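-- pv_equiv track=rewrite | github.com/amalrajan/advent-of-code | 2015/09.2.py | hamiltonian_path
-- ===== SOURCE A (Python) =====
-- def hamiltonian_path(graph, start):
--     res = []
--
--     def backtrack(curr, visited, dist):
--         if len(visited) == len(graph):
--             res.append(dist)
--             return
--
--         for nei, nei_dist in graph[curr]:
--             if nei not in visited:
--                 backtrack(nei, visited | {nei}, dist + nei_dist)
--
--     backtrack(start, {start}, 0)
--     return res
-- ===== SOURCE B (Python) =====
-- def hamiltonian_path(graph, start):
--     res = []
--     stack = [(start, {start}, 0)]
--     while stack:
--         curr, visited, dist = stack.pop()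
--         if len(visited) == len(graph):
--             res.append(dist)
--             continue
--         for nei, nei_dist in reversed(graph[curr]):
--             if nei not in visited:
--                 stack.append((nei, visited | {nei}, dist + nei_dist))
--     return res
-- ===== Notes on version B (the rewrite author's own statement) =====
-- stated objective: alternative
-- what changed: A's recursive backtracking with a closure mutating a shared res list is replaced by an iterative DFS over an explicit stack of (node, visited, dist) frames, pushing valid neighbours in reversed order so the output order matches A's.
-- outside the precondition, e.g. on hamiltonian_path({'a': [('b', 1), ('c', 5)], 'b': [('c', 2)]}, 'a'): A returns [1, 5], B returns [1, 5]
import Mathlib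
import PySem

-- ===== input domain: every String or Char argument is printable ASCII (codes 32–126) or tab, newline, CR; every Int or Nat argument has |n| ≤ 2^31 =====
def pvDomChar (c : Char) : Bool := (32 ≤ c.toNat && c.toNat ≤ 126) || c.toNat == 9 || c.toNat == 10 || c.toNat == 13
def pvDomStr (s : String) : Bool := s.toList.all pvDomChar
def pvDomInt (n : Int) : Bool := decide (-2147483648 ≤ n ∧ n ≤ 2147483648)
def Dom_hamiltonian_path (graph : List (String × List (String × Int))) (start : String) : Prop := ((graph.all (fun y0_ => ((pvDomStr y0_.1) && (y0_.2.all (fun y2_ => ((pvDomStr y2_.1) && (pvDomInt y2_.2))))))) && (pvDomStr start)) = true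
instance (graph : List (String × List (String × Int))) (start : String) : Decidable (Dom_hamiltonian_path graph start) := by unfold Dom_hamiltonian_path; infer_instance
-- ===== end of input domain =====

-- B replaces A's recursive backtracking by an iterative DFS over an explicit stack of
-- (node, visited, distance) frames (same output, same order, no speed claim).

-- graph[curr]: dict lookup (first match; Pre_ forbids duplicate keys and missing keys,
-- so the KeyError default [] is never reached inside Pre_)
def pvLookup (graph : List (String × List (String × Int))) (k : String) : List (String × Int) :=
  ((graph.find? (fun p => p.1 == k)).map Prod.snd).getD []

-- ===== PORT A =====
-- A's inner 'backtrack': the shared res list is threaded as the fold accumulator;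
-- fuel bounds the recursion depth (graph.length + 1 suffices, see hpAux_fuel_congr)
def hpAux (graph : List (String × List (String × Int))) :
    Nat → String → PySem.Set String → Int → List Int
  | 0, _, _, _ => []
  | fuel+1, curr, visited, dist =>
    if visited.length = graph.length then [dist]
    else (pvLookup graph curr).foldl
      (fun res p =>
        if PySem.Set.contains visited p.1 then res
        else res ++ hpAux graph fuel p.1 (PySem.Set.add visited p.1) (dist + p.2)) []

def hamiltonian_path (graph : List (String × List (String × Int))) (start : String) : List Int :=
  hpAux graph (graph.length + 1) start (PySem.Set.ofList [start]) 0

-- ===== PORT B =====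
-- maximum adjacency-list length, used only to pre-compute enough fuel for the loop
def maxDeg (graph : List (String × List (String × Int))) : Nat :=
  graph.foldr (fun p m => max p.2.length m) 0

def bpFuel (D : Nat) : Nat → Nat
  | 0 => 1
  | k+1 => 1 + D * bpFuel D k

-- B's while loop. Python pushes reversed(valid) onto the END of the stack and pops from
-- the END; with the top of the stack at the HEAD this is exactly 'valid ++ rest'.
def bpLoop (graph : List (String × List (String × Int))) :
    Nat → List (String × PySem.Set String × Int) → List Int → List Int
  | _, [], res => res
  | 0, _::_, res => res
  | fuel+1, (curr, visited, dist) :: rest, res =>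
    if visited.length = graph.length then bpLoop graph fuel rest (res ++ [dist])
    else bpLoop graph fuel
      (((pvLookup graph curr).filter (fun p => !(PySem.Set.contains visited p.1))).map
        (fun p => (p.1, PySem.Set.add visited p.1, dist + p.2)) ++ rest) res

def hamiltonian_path_alt (graph : List (String × List (String × Int))) (start : String) : List Int :=
  bpLoop graph (bpFuel (maxDeg graph) graph.length)
    [(start, PySem.Set.ofList [start], 0)] []

-- ===== PRECONDITION & SPEC =====
-- Pre_ excludes graphs whose association list has duplicate keys (it then does not
-- represent a Python dict) and, unless the graph has exactly one key (A then returns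
-- [0] before any lookup), inputs where start or a listed neighbour is not a key, on
-- which A in general raises KeyError (on a few such inputs A happens to return before
-- reaching the missing key; B returns the same value there, see the cites).
def Pre_hamiltonian_path (graph : List (String × List (String × Int))) (start : String) : Prop :=
  (graph.map Prod.fst).Nodup ∧
  (graph.length = 1 ∨
    (start ∈ graph.map Prod.fst ∧ ∀ p ∈ graph, ∀ q ∈ p.2, q.1 ∈ graph.map Prod.fst))
instance (graph : List (String × List (String × Int))) (start : String) : Decidable (Pre_hamiltonian_path graph start) := by unfold Pre_hamiltonian_path; infer_instance
def pvWitness_hamiltonian_path : (List (String × List (String × Int))) × String :=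
  ([("a", [("b", (1 : Int))]), ("b", [])], "a")

def Spec_hamiltonian_path (graph : List (String × List (String × Int))) (start : String) (out : List Int) : Prop := out = hamiltonian_path_alt graph start
instance (graph : List (String × List (String × Int))) (start : String) (out : List Int) : Decidable (Spec_hamiltonian_path graph start out) := by unfold Spec_hamiltonian_path; infer_instance

-- ===== CLAIM (what is proved, stated in full; the proofs are below) =====
def Claim_equal_hamiltonian_path : Prop := ∀ (graph : List (String × List (String × Int))) (start : String), Dom_hamiltonian_path graph start → Pre_hamiltonian_path graph start → Spec_hamiltonian_path graph start (hamiltonian_path graph start)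

-- ===== LEMMAS AND PROOFS =====

theorem one_le_bpFuel (D k : Nat) : 1 ≤ bpFuel D k := by
  cases k <;> simp [bpFuel]

theorem bpFuel_le_succ (D k : Nat) : bpFuel D k ≤ bpFuel D (k+1) := by
  induction k with
  | zero => simp [bpFuel]
  | succ k ih =>
    simp only [bpFuel]
    exact Nat.add_le_add_left (Nat.mul_le_mul_left _ ih) 1

theorem length_pvLookup_le (graph : List (String × List (String × Int))) (c : String) :
    (pvLookup graph c).length ≤ maxDeg graph := by
  unfold pvLookup
  cases h : graph.find? (fun p => p.1 == c) with
  | none => simp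
  | some p =>
    simp only [Option.map_some, Option.getD_some]
    have hmem : p ∈ graph := List.mem_of_find?_eq_some h
    clear h
    induction graph with
    | nil => cases hmem
    | cons q l ih =>
      simp only [maxDeg, List.foldr_cons]
      rcases List.mem_cons.mp hmem with rfl | hm
      · exact le_max_left _ _
      · exact le_trans (ih hm) (le_max_right _ _)

theorem length_add_of_not_contains {s : PySem.Set String} {x : String}
    (h : PySem.Set.contains s x = false) :
    (PySem.Set.add s x).length = s.length + 1 := by
  have hx : ¬ x ∈ s := by simpa using h
  simp [PySem.Set.add, hx]

-- 'for p in l: if not C(p): res += F(p)' as a flatMap over the valid elements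
theorem foldl_skip_append {α β : Type} (C : α → Bool) (F : α → List β) (l : List α)
    (acc : List β) :
    l.foldl (fun res p => if C p then res else res ++ F p) acc
      = acc ++ (l.filter (fun p => !C p)).flatMap F := by
  induction l generalizing acc with
  | nil => simp
  | cons p l ih =>
    by_cases h : C p
    · simp [List.foldl_cons, h, ih]
    · have h' : C p = false := by simpa using h
      simp [List.foldl_cons, h', ih]

theorem flatMap_congr_mem {α β : Type} {l : List α} {F G : α → List β}
    (h : ∀ p ∈ l, F p = G p) : l.flatMap F = l.flatMap G := by
  induction l with
  | nil => rfl
  | cons p l ih =>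
    simp only [List.flatMap_cons]
    rw [h p (List.mem_cons_self), ih (fun q hq => h q (List.mem_cons_of_mem _ hq))]

-- one unfolding of A's recursion, with the fold rewritten as a flatMap
theorem hpAux_succ (graph : List (String × List (String × Int))) (f : Nat) (c : String)
    (v : PySem.Set String) (d : Int) :
    hpAux graph (f+1) c v d
      = if v.length = graph.length then [d]
        else ((pvLookup graph c).filter (fun p => !(PySem.Set.contains v p.1))).flatMap
          (fun p => hpAux graph f p.1 (PySem.Set.add v p.1) (d + p.2)) := by
  simp only [hpAux]
  split
  · rfl
  · rw [foldl_skip_append]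
    simp

-- A's recursion gives the same result for any two sufficient fuels
theorem hpAux_fuel_congr (graph : List (String × List (String × Int))) :
    ∀ (f1 f2 : Nat) (c : String) (v : PySem.Set String) (d : Int),
      v.length ≤ graph.length →
      graph.length + 1 - v.length ≤ f1 → graph.length + 1 - v.length ≤ f2 →
      hpAux graph f1 c v d = hpAux graph f2 c v d := by
  intro f1
  induction f1 with
  | zero => intro f2 c v d hv h1 _; omega
  | succ f1 ih =>
    intro f2 c v d hv h1 h2
    cases f2 with
    | zero => omega
    | succ f2 =>
      rw [hpAux_succ, hpAux_succ]
      by_cases hlen : v.length = graph.length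
      · simp [hlen]
      · simp only [if_neg hlen]
        have hvlt : v.length < graph.length := lt_of_le_of_ne hv hlen
        apply flatMap_congr_mem
        intro p hp
        have hc : PySem.Set.contains v p.1 = false := by
          have := (List.mem_filter.mp hp).2
          simpa using this
        have hlen' : (PySem.Set.add v p.1).length = v.length + 1 :=
          length_add_of_not_contains hc
        exact ih f2 p.1 _ (d + p.2) (by omega) (by omega) (by omega)

-- the value A's backtrack produces from a frame (with canonical sufficient fuel)
def hpRun (graph : List (String × List (String × Int)))
    (fr : String × PySem.Set String × Int) : List Int :=
  hpAux graph (graph.length + 1) fr.1 fr.2.1 fr.2.2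

-- fuel needed to fully process a stack of frames
def stackCost (graph : List (String × List (String × Int)))
    (stack : List (String × PySem.Set String × Int)) : Nat :=
  stack.foldr (fun fr acc => bpFuel (maxDeg graph) (graph.length - fr.2.1.length) + acc) 0

theorem stackCost_cons (graph : List (String × List (String × Int)))
    (fr : String × PySem.Set String × Int) (rest : List (String × PySem.Set String × Int)) :
    stackCost graph (fr :: rest)
      = bpFuel (maxDeg graph) (graph.length - fr.2.1.length) + stackCost graph rest := rfl

theorem stackCost_append (graph : List (String × List (String × Int)))
    (s t : List (String × PySem.Set String × Int)) :
    stackCost graph (s ++ t) = stackCost graph s + stackCost graph t := by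
  induction s with
  | nil => simp [stackCost]
  | cons fr s ih => simp [stackCost, List.foldr_cons] at *; omega

theorem stackCost_map (graph : List (String × List (String × Int)))
    {α : Type} (l : List α) (f : α → String × PySem.Set String × Int) (k : Nat)
    (h : ∀ p ∈ l, graph.length - (f p).2.1.length = k) :
    stackCost graph (l.map f) = l.length * bpFuel (maxDeg graph) k := by
  induction l with
  | nil => simp [stackCost]
  | cons p l ih =>
    simp only [List.map_cons, stackCost, List.foldr_cons, List.length_cons]
    rw [h p (List.mem_cons_self)]
    have := ih (fun q hq => h q (List.mem_cons_of_mem _ hq))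
    simp only [stackCost] at this
    rw [this]; ring

-- the stack loop with enough fuel computes the concatenation of the frames' backtrack results
theorem bpLoop_eq (graph : List (String × List (String × Int))) :
    ∀ (fuel : Nat) (stack : List (String × PySem.Set String × Int)) (res : List Int),
      (∀ fr ∈ stack, fr.2.1.length ≤ graph.length) →
      stackCost graph stack ≤ fuel →
      bpLoop graph fuel stack res = res ++ stack.flatMap (hpRun graph) := by
  intro fuel
  induction fuel with
  | zero =>
    intro stack res hinv hcost
    cases stack with
    | nil => simp [bpLoop]
    | cons fr rest =>
      exfalso
      have h1 : 1 ≤ bpFuel (maxDeg graph) (graph.length - fr.2.1.length) := one_le_bpFuel _ _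
      rw [stackCost_cons] at hcost
      omega
  | succ fuel ih =>
    intro stack res hinv hcost
    cases stack with
    | nil => simp [bpLoop]
    | cons fr rest =>
      obtain ⟨c, v, d⟩ := fr
      have hv : v.length ≤ graph.length := hinv (c, v, d) (List.mem_cons_self)
      rw [stackCost_cons] at hcost
      dsimp only at hcost
      by_cases hlen : v.length = graph.length
      · simp only [bpLoop, if_pos hlen]
        rw [ih rest (res ++ [d]) (fun fr h => hinv fr (List.mem_cons_of_mem _ h))
          (by have := one_le_bpFuel (maxDeg graph) (graph.length - v.length); omega)]
        have hrun : hpRun graph (c, v, d) = [d] := by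
          simp only [hpRun]
          rw [hpAux_succ]
          simp [hlen]
        simp [hrun]
      · have hvlt : v.length < graph.length := lt_of_le_of_ne hv hlen
        simp only [bpLoop, if_neg hlen]
        set valid := (pvLookup graph c).filter (fun p => !(PySem.Set.contains v p.1)) with hvalid
        set pushes := valid.map (fun p => (p.1, PySem.Set.add v p.1, d + p.2)) with hpushes
        have hlenadd : ∀ p ∈ valid, (PySem.Set.add v p.1).length = v.length + 1 := by
          intro p hp
          apply length_add_of_not_contains
          have := (List.mem_filter.mp hp).2
          simpa using this
        have hinv' : ∀ fr ∈ pushes ++ rest, fr.2.1.length ≤ graph.length := by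
          intro fr hfr
          rcases List.mem_append.mp hfr with hfr | hfr
          · obtain ⟨p, hp, rfl⟩ := List.mem_map.mp hfr
            simpa [hlenadd p hp] using hvlt
          · exact hinv fr (List.mem_cons_of_mem _ hfr)
        have hcost' : stackCost graph (pushes ++ rest) ≤ fuel := by
          rw [stackCost_append]
          have hmap : stackCost graph pushes
              = valid.length * bpFuel (maxDeg graph) (graph.length - (v.length + 1)) := by
            apply stackCost_map
            intro p hp
            rw [hlenadd p hp]
          have hvlen : valid.length ≤ maxDeg graph :=
            le_trans (List.length_filter_le _ _) (length_pvLookup_le graph c)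
          have hstep : bpFuel (maxDeg graph) (graph.length - v.length)
              = 1 + maxDeg graph * bpFuel (maxDeg graph) (graph.length - (v.length + 1)) := by
            have : graph.length - v.length = (graph.length - (v.length + 1)) + 1 := by omega
            rw [this, bpFuel]
          have hmul : valid.length * bpFuel (maxDeg graph) (graph.length - (v.length + 1))
              ≤ maxDeg graph * bpFuel (maxDeg graph) (graph.length - (v.length + 1)) :=
            Nat.mul_le_mul_right _ hvlen
          omega
        rw [ih (pushes ++ rest) res hinv' hcost']
        have hrun : hpRun graph (c, v, d) = pushes.flatMap (hpRun graph) := by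
          simp only [hpRun]
          rw [hpAux_succ]
          simp only [if_neg hlen, ← hvalid, hpushes, List.flatMap_map]
          apply flatMap_congr_mem
          intro p hp
          exact hpAux_fuel_congr graph _ _ _ _ _ (by have := hlenadd p hp; omega)
            (by have := hlenadd p hp; omega) (by have := hlenadd p hp; omega)
        simp [hrun]

-- ===== VERDICT (by name: the statement is the Claim_ definition above) =====
theorem hamiltonian_path_spec : Claim_equal_hamiltonian_path := by
  intro graph start _ hpre
  unfold Spec_hamiltonian_path hamiltonian_path hamiltonian_path_alt
  have hne : 1 ≤ graph.length := by
    obtain ⟨-, h1 | ⟨hs, -⟩⟩ := hpre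
    · omega
    · cases graph with
      | nil => simp at hs
      | cons _ _ => simp
  have hv1 : (PySem.Set.ofList [start]).length = 1 := by
    simp [PySem.Set.ofList, PySem.Set.add, PySem.Set.contains]
  rw [bpLoop_eq graph _ _ _
    (by intro fr hfr
        simp only [List.mem_singleton] at hfr
        subst hfr
        simpa [hv1] using hne)
    (by simp only [stackCost, List.foldr_cons, List.foldr_nil, hv1]
        have hmono : bpFuel (maxDeg graph) (graph.length - 1) ≤ bpFuel (maxDeg graph) graph.length := by
          have : graph.length = (graph.length - 1) + 1 := by omega
          rw [this]
          exact bpFuel_le_succ _ _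
        omega)]
  simp [hpRun]
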